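-- pv_equiv track=rewrite | github.com/Tar-Roccorendil/repfloat | repfloat.py | normalize_period
-- ===== SOURCE A (Python) =====
-- def find_period(s: str) -> int:
--     return bool(s) and (s+s).find(s,1,-1) or -1
--
-- def normalize_period(digits: str, rep: int) -> tuple[str,int]:
--     size = len(digits)
--
--     period_length = find_period(digits[rep:size])
--     if period_length > 0: size = rep + period_length #simplifies a periodic period
--
--     if size > rep:
--         while digits[rep-1] == digits[size-1]: #starts the period as early as possible
--             rep -= 1
--             size-= 1
--
--     digits = digits[:size]
--
--     if all(d=='0' for d in digits[:rep]):
--         period = digits[rep:]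
--         for d in period:
--             if d == '0':
--                 digits += '0'
--                 rep += 1
--                 size+= 1
--             else: break
--
--     return (digits,rep)
-- ===== SOURCE B (Python) =====
-- def normalize_period(digits: str, rep: int) -> tuple[str, int]:
--     n = len(digits)
--     sub = digits[rep:n]
--     m = len(sub)
--     p = next((i for i in range(1, m) if sub[i:] + sub[:i] == sub), -1)
--     size = rep + p if p > 0 else n
--
--     if size > rep:
--         k = 0
--         while digits[rep - 1 - k] == digits[size - 1 - k]:
--             k += 1
--         rep -= k
--         size -= k
--
--     digits = digits[:size]
--
--     prefix = digits[:rep]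
--     if prefix == '0' * len(prefix):
--         period = digits[rep:]
--         z = 0
--         while z < len(period) and period[z] == '0':
--             z += 1
--         digits += '0' * z
--         rep += z
--
--     return (digits, rep)
-- ===== Notes on version B (the rewrite author's own statement) =====
-- stated objective: alternative
-- what changed: B finds the smallest period by scanning rotations directly instead of the doubled-string find trick, replaces the backward while loop by counting the shift k and subtracting it once, and replaces the zero-absorption append loop by counting the period's leading zeros and appending them in one step.
import Mathlib
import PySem

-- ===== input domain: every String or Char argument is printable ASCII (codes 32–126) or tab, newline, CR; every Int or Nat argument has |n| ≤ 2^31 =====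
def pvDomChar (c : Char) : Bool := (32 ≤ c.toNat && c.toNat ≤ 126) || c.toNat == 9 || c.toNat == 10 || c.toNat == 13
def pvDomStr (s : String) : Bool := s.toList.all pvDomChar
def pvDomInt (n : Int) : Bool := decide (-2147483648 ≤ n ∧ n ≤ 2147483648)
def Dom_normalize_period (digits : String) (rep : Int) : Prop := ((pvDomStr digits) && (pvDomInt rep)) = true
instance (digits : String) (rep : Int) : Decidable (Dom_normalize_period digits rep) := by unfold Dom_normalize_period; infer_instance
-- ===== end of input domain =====

-- B replaces the doubled-string find trick by a direct smallest-rotation scan, the backward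
-- while loop by a count-then-subtract pass, and the zero-absorption loop by counting leading
-- zeros and appending them at once (objective: alternative decomposition, same cost).


-- ===== PORT A =====
-- find_period: `bool(s) and (s+s).find(s,1,-1) or -1`
def findPeriodA (s : List Char) : Int :=
  if s = [] then -1
  else
    let f := PySem.Chars.findFrom (s ++ s) s 1 (some (-1))
    if f = 0 then -1 else f

-- the backward `while digits[rep-1] == digits[size-1]` loop (fuel makes it total; the
-- `none` branches are where Python raises IndexError, excluded by Pre_)
def loopA (ds : List Char) (fuel : Nat) (rep size : Int) : Int × Int :=
  match fuel with
  | 0 => (rep, size)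
  | fuel + 1 =>
    match PySem.List.pyGet? ds (rep - 1), PySem.List.pyGet? ds (size - 1) with
    | some a, some b => if a = b then loopA ds fuel (rep - 1) (size - 1) else (rep, size)
    | _, _ => (rep, size)

-- `for d in period: if d == '0': digits += '0'; rep += 1; size += 1 else: break`
def zloopA (ds : List Char) (rep size : Int) (period : List Char) : List Char × Int × Int :=
  match period with
  | [] => (ds, rep, size)
  | d :: rest => if d = '0' then zloopA (ds ++ ['0']) (rep + 1) (size + 1) rest else (ds, rep, size)

def normalize_period (digits : String) (rep : Int) : String × Int :=
  let l := digits.toList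
  let size : Int := l.length
  let pl := findPeriodA (PySem.List.slice l (some rep) (some size))
  let size := if pl > 0 then rep + pl else size
  let rs := if size > rep then loopA l ((rep + l.length + 1).toNat) rep size else (rep, size)
  let rep := rs.1
  let size := rs.2
  let l2 := PySem.List.slice l none (some size)
  if (PySem.List.slice l2 none (some rep)).all (fun d => d == '0') then
    let r := zloopA l2 rep size (PySem.List.slice l2 (some rep) none)
    (String.ofList r.1, r.2.1)
  else (String.ofList l2, rep)

-- ===== PORT B =====
-- first i in range(1, len(sub)) with sub[i:]+sub[:i] == sub, else -1
def rotScanB (s : List Char) (i : Nat) : Int :=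
  if i < s.length then
    (if s.drop i ++ s.take i = s then (i : Int) else rotScanB s (i + 1))
  else -1
termination_by s.length - i

-- `k = 0; while digits[rep-1-k] == digits[size-1-k]: k += 1`
def countB (ds : List Char) (fuel : Nat) (rep size : Int) (k : Nat) : Nat :=
  match fuel with
  | 0 => k
  | fuel + 1 =>
    match PySem.List.pyGet? ds (rep - 1 - k), PySem.List.pyGet? ds (size - 1 - k) with
    | some a, some b => if a = b then countB ds fuel rep size (k + 1) else k
    | _, _ => k

-- `z = 0; while z < len(period) and period[z] == '0': z += 1`
def zcountB (period : List Char) : Nat :=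
  match period with
  | [] => 0
  | d :: rest => if d = '0' then zcountB rest + 1 else 0

def normalize_period_alt (digits : String) (rep : Int) : String × Int :=
  let l := digits.toList
  let n : Int := l.length
  let sub := PySem.List.slice l (some rep) (some n)
  let p := rotScanB sub 1
  let size := if p > 0 then rep + p else n
  let rs :=
    if size > rep then
      let k := countB l ((rep + l.length + 1).toNat) rep size 0
      (rep - k, size - k)
    else (rep, size)
  let rep := rs.1
  let size := rs.2
  let l2 := PySem.List.slice l none (some size)
  let pre := PySem.List.slice l2 none (some rep)
  if pre = List.replicate pre.length '0' then
    let period := PySem.List.slice l2 (some rep) none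
    let z := zcountB period
    (String.ofList (l2 ++ List.replicate z '0'), rep + z)
  else (String.ofList l2, rep)

-- ===== PRECONDITION & SPEC =====
-- helpers for Pre_ (independent of the ports): the smallest nontrivial rotation period of the
-- slice digits[rep:], hence the value `size` holds when the while loop is entered
def pvRotFound (l : List Char) : Option Nat :=
  (List.range l.length).find? (fun i => decide (0 < i) && decide (l.drop i ++ l.take i = l))

def pvSizeI (l : List Char) (rep : Int) : Int :=
  match pvRotFound (PySem.List.slice l (some rep) (some (l.length : Int))) with
  | some i => rep + i
  | none => (l.length : Int)

-- Pre_ excludes exactly the inputs on which Python A raises IndexError: an empty string with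
-- rep < 0, and inputs whose backward comparison loop runs off the left end of the string
-- (it finds no mismatch within the n admissible wrapped positions).
def Pre_normalize_period (digits : String) (rep : Int) : Prop :=
  let l := digits.toList
  let n : Int := l.length
  (l = [] → 0 ≤ rep) ∧
  (l ≠ [] → rep < n →
    ∃ k ∈ List.range (rep + n).toNat,
      PySem.List.pyGetD l (rep - 1 - k) ' ' ≠ PySem.List.pyGetD l (pvSizeI l rep - 1 - k) ' ')

instance (digits : String) (rep : Int) : Decidable (Pre_normalize_period digits rep) := by
  unfold Pre_normalize_period; infer_instance

def pvWitness_normalize_period : String × Int := ("01", 1)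

def Spec_normalize_period (digits : String) (rep : Int) (out : String × Int) : Prop := out = normalize_period_alt digits rep
instance (digits : String) (rep : Int) (out : String × Int) : Decidable (Spec_normalize_period digits rep out) := by unfold Spec_normalize_period; infer_instance

-- ===== CLAIM (what is proved, stated in full; the proofs are below) =====
def Claim_equal_normalize_period : Prop := ∀ (digits : String) (rep : Int), Dom_normalize_period digits rep → Pre_normalize_period digits rep → Spec_normalize_period digits rep (normalize_period digits rep)

-- ===== LEMMAS AND PROOFS =====

theorem rotScan_eq_neg (s : List Char) :
    ∀ (d i : Nat), s.length - i ≤ d → (∀ j, i ≤ j → j < s.length → s.drop j ++ s.take j ≠ s) →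
      rotScanB s i = -1 := by
  intro d
  induction d with
  | zero =>
    intro i hd h
    rw [rotScanB, if_neg (by omega)]
  | succ d ih =>
    intro i hd h
    by_cases hi : i < s.length
    · rw [rotScanB, if_pos hi, if_neg (h i le_rfl hi)]
      exact ih (i + 1) (by omega) (fun j hj hj2 => h j (by omega) hj2)
    · rw [rotScanB, if_neg hi]

theorem rotScan_eq_found (s : List Char) :
    ∀ (d i i₀ : Nat), i₀ - i ≤ d → i ≤ i₀ → i₀ < s.length → s.drop i₀ ++ s.take i₀ = s →
      (∀ j, i ≤ j → j < i₀ → s.drop j ++ s.take j ≠ s) → rotScanB s i = (i₀ : Int) := by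
  intro d
  induction d with
  | zero =>
    intro i i₀ hd h1 h2 hc _
    have : i = i₀ := by omega
    subst this
    rw [rotScanB, if_pos h2, if_pos hc]
  | succ d ih =>
    intro i i₀ hd h1 h2 hc hmin
    by_cases hi : i = i₀
    · subst hi; rw [rotScanB, if_pos h2, if_pos hc]
    · rw [rotScanB, if_pos (by omega), if_neg (hmin i le_rfl (by omega))]
      exact ih (i + 1) i₀ (by omega) (by omega) h2 hc (fun j hj hj2 => hmin j (by omega) hj2)

theorem t_eq (s : List Char) (hm : 0 < s.length) :
    ((s ++ s).take (2 * s.length - 1)).drop 1 = s.drop 1 ++ s.take (s.length - 1) := by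
  rw [List.take_append, List.take_of_length_le (by omega), List.drop_append]
  have h1 : 2 * s.length - 1 - s.length = s.length - 1 := by omega
  have h2 : 1 - s.length = 0 := by omega
  rw [h1, h2, List.drop_zero]

theorem occ_iff (s : List Char) (hm : 0 < s.length) (j : Nat) :
    s <+: (s.drop 1 ++ s.take (s.length - 1)).drop j ↔
      (j + 2 ≤ s.length ∧ s.drop (j + 1) ++ s.take (j + 1) = s) := by
  have key : ∀ j', j' + 2 ≤ s.length →
      (s.drop 1 ++ s.take (s.length - 1)).drop j' = s.drop (j' + 1) ++ s.take (s.length - 1) := by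
    intro j' hj
    rw [List.drop_append, List.drop_drop, List.length_drop]
    have h0 : j' - (s.length - 1) = 0 := by omega
    have h1 : 1 + j' = j' + 1 := by omega
    rw [h0, h1, List.drop_zero]
  have key2 : ∀ j', j' + 2 ≤ s.length →
      (s.drop (j' + 1) ++ s.take (s.length - 1)).take s.length = s.drop (j' + 1) ++ s.take (j' + 1) := by
    intro j' hj
    rw [List.take_append, List.take_of_length_le (by rw [List.length_drop]; omega),
      List.take_take, List.length_drop]
    congr 2
    omega
  constructor
  · intro hp
    have hl := hp.length_le
    rw [List.length_drop, List.length_append, List.length_drop, List.length_take] at hl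
    have hj : j + 2 ≤ s.length := by omega
    refine ⟨hj, ?_⟩
    rw [List.prefix_iff_eq_take, key j hj, key2 j hj] at hp
    exact hp.symm
  · rintro ⟨hj, hc⟩
    rw [List.prefix_iff_eq_take, key j hj, key2 j hj]
    exact hc.symm


theorem findFrom_unfold (s : List Char) (h : s ≠ []) :
    PySem.Chars.findFrom (s ++ s) s 1 (some (-1)) =
      (if PySem.Chars.find (((s ++ s).take (2 * s.length - 1)).drop 1) s = -1 then -1
       else 1 + PySem.Chars.find (((s ++ s).take (2 * s.length - 1)).drop 1) s) := by
  have hm : 0 < s.length := List.length_pos_iff.mpr h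
  have e1 : ((-1 : Int) + ((s.length + s.length : Nat) : Int)).toNat = 2 * s.length - 1 := by omega
  have c1 : ¬(((s.length + s.length : Nat) : Int) < -1) := by omega
  have c2 : (-1 : Int) < 0 := by omega
  have c3 : ¬((-1 : Int) + ((s.length + s.length : Nat) : Int) < 0) := by omega
  have c4 : ¬((1 : Int) < 0) := by omega
  have c5 : ¬((-1 : Int) + ((s.length + s.length : Nat) : Int) < 1) := by omega
  simp only [PySem.Chars.findFrom, List.length_append, if_neg c1, if_pos c2, if_neg c3,
    if_neg c4, if_neg c5, e1, Int.toNat_one]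

theorem findPeriod_eq (s : List Char) : findPeriodA s = rotScanB s 1 := by
  by_cases h : s = []
  · subst h
    rw [findPeriodA, rotScanB]
    norm_num
  · have hm : 0 < s.length := List.length_pos_iff.mpr h
    simp only [findPeriodA, if_neg h]
    rw [findFrom_unfold s h, t_eq s hm]
    by_cases hr : PySem.Chars.find (s.drop 1 ++ s.take (s.length - 1)) s = -1
    · rw [if_pos hr, if_neg (by omega)]
      refine (rotScan_eq_neg s s.length 1 (by omega) ?_).symm
      intro j hj hjlen hc
      have hocc : s <+: (s.drop 1 ++ s.take (s.length - 1)).drop (j - 1) := by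
        refine (occ_iff s hm (j - 1)).2 ⟨by omega, ?_⟩
        have : j - 1 + 1 = j := by omega
        rw [this]; exact hc
      have : PySem.Chars.isIn s (s.drop 1 ++ s.take (s.length - 1)) = true :=
        (PySem.Chars.exists_prefix_drop_iff_isIn s _).1 ⟨j - 1, hocc⟩
      rw [PySem.Chars.isIn_iff_infix] at this
      exact ((PySem.Chars.find_eq_neg_one_iff _ _).1 hr) this
    · have hr0 : 0 ≤ PySem.Chars.find (s.drop 1 ++ s.take (s.length - 1)) s := by
        have := PySem.Chars.neg_one_le_find (s.drop 1 ++ s.take (s.length - 1)) s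
        omega
      obtain ⟨hpre, hmin⟩ := PySem.Chars.find_spec hr0
      set r := PySem.Chars.find (s.drop 1 ++ s.take (s.length - 1)) s with hrdef
      have hocc := (occ_iff s hm r.toNat).1 hpre
      have hscan : rotScanB s 1 = ((r.toNat + 1 : Nat) : Int) := by
        refine rotScan_eq_found s (r.toNat + 1) 1 (r.toNat + 1) (by omega) (by omega)
          (by omega) ?_ ?_
        · exact hocc.2
        · intro j hj hjlt hc
          have hpref : s <+: (s.drop 1 ++ s.take (s.length - 1)).drop (j - 1) := by
            refine (occ_iff s hm (j - 1)).2 ⟨by omega, ?_⟩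
            have : j - 1 + 1 = j := by omega
            rw [this]; exact hc
          exact hmin (j - 1) (by omega) hpref
      rw [if_neg hr, if_neg (by omega), hscan]
      omega

theorem count_shift (ds : List Char) (fuel : Nat) : ∀ (rep size : Int) (k : Nat),
    countB ds fuel rep size (k + 1) = countB ds fuel (rep - 1) (size - 1) k + 1 := by
  induction fuel with
  | zero => intro rep size k; rfl
  | succ fuel ih =>
    intro rep size k
    have h1 : rep - 1 - ((k : Int) + 1) = rep - 1 - 1 - k := by ring
    have h2 : size - 1 - ((k : Int) + 1) = size - 1 - 1 - k := by ring
    simp only [countB, Nat.cast_add, Nat.cast_one, h1, h2]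
    cases PySem.List.pyGet? ds (rep - 1 - 1 - (k : Int)) with
    | none => rfl
    | some a =>
      cases PySem.List.pyGet? ds (size - 1 - 1 - (k : Int)) with
      | none => rfl
      | some b =>
        by_cases hab : a = b
        · simp only [hab, if_true]
          exact ih rep size (k + 1)
        · simp [hab]

theorem loop_eq (ds : List Char) (fuel : Nat) : ∀ (rep size : Int),
    loopA ds fuel rep size =
      (rep - countB ds fuel rep size 0, size - countB ds fuel rep size 0) := by
  induction fuel with
  | zero => intro rep size; simp [loopA, countB]
  | succ fuel ih =>
    intro rep size
    simp only [loopA, countB, Nat.cast_zero, sub_zero]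
    cases PySem.List.pyGet? ds (rep - 1) with
    | none => simp
    | some a =>
      cases PySem.List.pyGet? ds (size - 1) with
      | none => simp
      | some b =>
        by_cases hab : a = b
        · have hc := count_shift ds fuel rep size 0
          simp only [hab, if_true, ih (rep - 1) (size - 1),
            show (0 : Nat) + 1 = 1 from rfl] at *
          rw [show countB ds fuel rep size 1 = countB ds fuel rep size (0 + 1) from rfl, hc]
          apply Prod.ext <;> push_cast <;> ring
        · simp [hab]

theorem zloop_eq (period : List Char) : ∀ (ds : List Char) (rep size : Int),
    zloopA ds rep size period =
      (ds ++ List.replicate (zcountB period) '0', rep + zcountB period, size + zcountB period) := by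
  induction period with
  | nil => intro ds rep size; simp [zloopA, zcountB]
  | cons d rest ih =>
    intro ds rep size
    by_cases hd : d = '0'
    · simp only [zloopA, zcountB, if_pos hd, ih]
      refine Prod.ext ?_ (Prod.ext ?_ ?_)
      · simp [List.replicate_succ]
      · show rep + 1 + (zcountB rest : Int) = rep + ((zcountB rest + 1 : Nat) : Int); push_cast; ring
      · show size + 1 + (zcountB rest : Int) = size + ((zcountB rest + 1 : Nat) : Int); push_cast; ring
    · simp [zloopA, zcountB, hd]

theorem all_zero_iff (l : List Char) :
    (l.all (fun d => d == '0') = true) ↔ l = List.replicate l.length '0' := by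
  simp [List.all_eq_true, List.eq_replicate_iff]

theorem tail_eq (l2 : List Char) (rep size : Int) :
    (if (PySem.List.slice l2 none (some rep)).all (fun d => d == '0') then
       ((String.ofList (zloopA l2 rep size (PySem.List.slice l2 (some rep) none)).1),
        (zloopA l2 rep size (PySem.List.slice l2 (some rep) none)).2.1)
     else (String.ofList l2, rep))
    = (if (PySem.List.slice l2 none (some rep)) = List.replicate (PySem.List.slice l2 none (some rep)).length '0' then
        (String.ofList (l2 ++ List.replicate (zcountB (PySem.List.slice l2 (some rep) none)) '0'),
         rep + zcountB (PySem.List.slice l2 (some rep) none))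
      else (String.ofList l2, rep)) := by
  by_cases h : (PySem.List.slice l2 none (some rep)) = List.replicate (PySem.List.slice l2 none (some rep)).length '0'
  · rw [if_pos h, if_pos ((all_zero_iff _).2 h), zloop_eq]
  · rw [if_neg h, if_neg (fun hc => h ((all_zero_iff _).1 hc))]

theorem ports_eq (digits : String) (rep : Int) :
    normalize_period digits rep = normalize_period_alt digits rep := by
  unfold normalize_period normalize_period_alt
  dsimp only
  rw [findPeriod_eq, loop_eq]
  exact tail_eq _ _ _

-- ===== VERDICT (by name: the statement is the Claim_ definition above) =====
theorem normalize_period_spec : Claim_equal_normalize_period := by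
  intro digits rep _ _
  unfold Spec_normalize_period
  exact ports_eq digits rep
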